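-- pv_equiv track=rewrite | github.com/lvfonsecaa/LYM-project0 | model.py | validar_y_extraer_parametros
-- ===== SOURCE A (Python) =====
-- def validar_y_extraer_parametros(arr):
--     # Verificar que el array empiece con '('
--     if arr[0] != '(':
--         return False, []
--
--     # Inicializar un contador de paréntesis para manejar el anidamiento
--     contador_par = 1
--     indice_cierre = -1
--
--     # Buscar el paréntesis de cierre correspondiente al primer '('
--     for i in range(1, len(arr)):
--         if arr[i] == '(':
--             contador_par += 1
--         elif arr[i] == ')':
--             contador_par -= 1
--             if contador_par == 0:
--                 indice_cierre = i
--                 break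
--
--     # Si no se encontró un cierre correspondiente
--     if indice_cierre == -1:
--         return False, []
--
--     # Extraer los elementos entre el primer '(' y su correspondiente ')'
--     contenido = arr[1:indice_cierre]
--
--     # Validar que los elementos intermedios tengan las comas en posiciones correctas
--     for i in range(1, len(contenido), 2):
--         if contenido[i] != ',':
--             return False, []
--
--     # Extraer los elementos que están en las posiciones impares (sin los separadores)
--     resultado = [contenido[i] for i in range(0, len(contenido), 2)]
--
--     # Eliminar los elementos desde el inicio hasta el paréntesis de cierre incluido
--     del arr[:indice_cierre + 1]
--
--     return True, resultado
-- ===== SOURCE B (Python) =====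
-- def validar_y_extraer_parametros(arr):
--     # Single fused pass: verify '(', track depth, validate commas at odd
--     # content offsets and collect tokens at even offsets in one loop.
--     if arr[0] != '(':
--         return False, []
--     depth = 1
--     resultado = []
--     for i in range(1, len(arr)):
--         tok = arr[i]
--         if tok == ')' and depth == 1:
--             del arr[:i + 1]
--             return True, resultado
--         if (i - 1) % 2 == 1:
--             if tok != ',':
--                 return False, []
--         else:
--             resultado.append(tok)
--         if tok == '(':
--             depth += 1
--         elif tok == ')':
--             depth -= 1
--     return False, []
-- ===== Notes on version B (the rewrite author's own statement) =====
-- stated objective: alternative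
-- what changed: B fuses A's three sequential passes (find matching close paren, validate commas at odd content offsets, extract tokens at even offsets) into one streaming loop maintaining a depth counter and building the result directly.
import Mathlib
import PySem

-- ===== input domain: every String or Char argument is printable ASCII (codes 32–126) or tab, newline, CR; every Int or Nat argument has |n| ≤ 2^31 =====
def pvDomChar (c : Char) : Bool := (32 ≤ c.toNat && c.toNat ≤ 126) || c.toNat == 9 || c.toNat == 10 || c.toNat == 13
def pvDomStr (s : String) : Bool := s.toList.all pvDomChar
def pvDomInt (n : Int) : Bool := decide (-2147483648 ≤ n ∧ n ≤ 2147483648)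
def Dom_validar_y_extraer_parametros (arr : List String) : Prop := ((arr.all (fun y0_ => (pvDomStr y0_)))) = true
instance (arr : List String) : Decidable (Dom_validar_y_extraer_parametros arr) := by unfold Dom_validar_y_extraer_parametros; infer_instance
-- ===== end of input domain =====

-- B fuses A's three sequential passes into one streaming loop (same cost); equivalence is about the
-- RETURN value only — both Pythons additionally perform the same `del arr[:idx+1]` mutation on success.

-- ===== PORT A =====
-- A's first loop: find the ')' matching the opening '(' (depth counter), starting at index 1.
def pvFindCloseA (arr : List String) (i : Nat) (cont : Int) : Option Nat :=
  if h : i < arr.length then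
    if arr.getD i "" = "(" then pvFindCloseA arr (i+1) (cont+1)
    else if arr.getD i "" = ")" then
      if cont - 1 = 0 then some i else pvFindCloseA arr (i+1) (cont - 1)
    else pvFindCloseA arr (i+1) cont
  else none
termination_by arr.length - i

-- A's second loop: for i in range(1, len(contenido), 2): contenido[i] must be ','.
def pvCommaOkA (c : List String) (i : Nat) : Bool :=
  if i < c.length then (c.getD i "" == ",") && pvCommaOkA c (i+2) else true
termination_by c.length - i

-- A's comprehension: [contenido[i] for i in range(0, len(contenido), 2)].
def pvEvensA (c : List String) (i : Nat) : List String :=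
  if i < c.length then c.getD i "" :: pvEvensA c (i+2) else []
termination_by c.length - i

def validar_y_extraer_parametros (arr : List String) : Bool × List String :=
  match PySem.List.pyGet? arr 0 with
  | none => (false, [])      -- arr[0] raises IndexError on []; excluded by Pre_
  | some h0 =>
    if h0 ≠ "(" then (false, [])
    else
      match pvFindCloseA arr 1 1 with
      | none => (false, [])
      | some idx =>
        let contenido := PySem.List.slice arr (some 1) (some (idx : Int))
        if pvCommaOkA contenido 1 then (true, pvEvensA contenido 0)
        else (false, [])

-- ===== PORT B =====
-- B's single loop: depth tracking, comma validation at odd content offsets,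
-- collection at even offsets, all fused.
def pvScanB (arr : List String) (i : Nat) (depth : Int) (res : List String) : Bool × List String :=
  if h : i < arr.length then
    let tok := arr.getD i ""
    if tok = ")" ∧ depth = 1 then (true, res)
    else if (i - 1) % 2 = 1 ∧ tok ≠ "," then (false, [])
    else
      let res' := if (i - 1) % 2 = 1 then res else res ++ [tok]
      let depth' := if tok = "(" then depth + 1 else if tok = ")" then depth - 1 else depth
      pvScanB arr (i+1) depth' res'
  else (false, [])
termination_by arr.length - i

def validar_y_extraer_parametros_alt (arr : List String) : Bool × List String :=
  match PySem.List.pyGet? arr 0 with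
  | none => (false, [])      -- arr[0] raises IndexError on []; B raises too; excluded by Pre_
  | some h0 =>
    if h0 ≠ "(" then (false, [])
    else pvScanB arr 1 1 []

-- ===== PRECONDITION & SPEC =====
-- Pre_ excludes only the empty list, on which both A and B raise IndexError at arr[0].
def Pre_validar_y_extraer_parametros (arr : List String) : Prop := arr ≠ []
instance (arr : List String) : Decidable (Pre_validar_y_extraer_parametros arr) := by
  unfold Pre_validar_y_extraer_parametros; infer_instance

def pvWitness_validar_y_extraer_parametros : List String := ["(", "x", ",", "y", ")"]

def Spec_validar_y_extraer_parametros (arr : List String) (out : Bool × List String) : Prop := out = validar_y_extraer_parametros_alt arr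
instance (arr : List String) (out : Bool × List String) : Decidable (Spec_validar_y_extraer_parametros arr out) := by unfold Spec_validar_y_extraer_parametros; infer_instance

-- ===== CLAIM (what is proved, stated in full; the proofs are below) =====
def Claim_equal_validar_y_extraer_parametros : Prop := ∀ (arr : List String), Dom_validar_y_extraer_parametros arr → Pre_validar_y_extraer_parametros arr → Spec_validar_y_extraer_parametros arr (validar_y_extraer_parametros arr)


-- ===== LEMMAS AND PROOFS =====

-- Index-based views of A's second and third passes (arr index j has content offset j-1).
def pvCIdx (arr : List String) (j idx : Nat) : Bool :=
  if j < idx then (arr.getD j "" == ",") && pvCIdx arr (j+2) idx else true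
termination_by idx - j

def pvEIdx (arr : List String) (j idx : Nat) : List String :=
  if j < idx then arr.getD j "" :: pvEIdx arr (j+2) idx else []
termination_by idx - j

lemma pvFindCloseA_some (arr : List String) : ∀ (n i : Nat) (d : Int) (j : Nat),
    arr.length ≤ i + n → pvFindCloseA arr i d = some j →
    i ≤ j ∧ j < arr.length ∧ (j = i → arr.getD i "" = ")" ∧ d = 1) := by
  intro n
  induction n with
  | zero =>
    intro i d j hn hf
    rw [pvFindCloseA] at hf
    simp [show ¬ i < arr.length by omega] at hf
  | succ n ih =>
    intro i d j hn hf
    rw [pvFindCloseA] at hf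
    by_cases h : i < arr.length
    · simp only [dif_pos h] at hf
      by_cases h1 : arr.getD i "" = "("
      · simp only [if_pos h1] at hf
        have := ih (i+1) (d+1) j (by omega) hf
        exact ⟨by omega, this.2.1, fun hj => by omega⟩
      · simp only [if_neg h1] at hf
        by_cases h2 : arr.getD i "" = ")"
        · simp only [if_pos h2] at hf
          by_cases h3 : d - 1 = 0
          · simp only [if_pos h3] at hf
            cases hf
            exact ⟨le_refl _, h, fun _ => ⟨h2, by omega⟩⟩
          · simp only [if_neg h3] at hf
            have := ih (i+1) (d-1) j (by omega) hf
            exact ⟨by omega, this.2.1, fun hj => by omega⟩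
        · simp only [if_neg h2] at hf
          have := ih (i+1) d j (by omega) hf
          exact ⟨by omega, this.2.1, fun hj => by omega⟩
    · simp only [dif_neg h] at hf
      cases hf

lemma pvCIdx_stop (arr : List String) (j idx : Nat) (h : ¬ j < idx) : pvCIdx arr j idx = true := by
  rw [pvCIdx]; simp [h]

lemma pvEIdx_stop (arr : List String) (j idx : Nat) (h : ¬ j < idx) : pvEIdx arr j idx = [] := by
  rw [pvEIdx]; simp [h]

lemma pvCIdx_comma (arr : List String) (j idx : Nat) (h : arr.getD j "" = ",") :
    pvCIdx arr j idx = pvCIdx arr (j+2) idx := by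
  rw [pvCIdx]
  by_cases hj : j < idx
  · rw [if_pos hj, h]
    simp
  · rw [if_neg hj, pvCIdx_stop arr (j+2) idx (by omega)]

-- The heart of the proof: B's fused scan computes A's three-pass pipeline,
-- expressed through the index-based views, from any start index i ≥ 1.
lemma pvScanB_eq (arr : List String) : ∀ (n i : Nat) (depth : Int) (res : List String),
    arr.length ≤ i + n → 1 ≤ i →
    pvScanB arr i depth res =
      match pvFindCloseA arr i depth with
      | none => (false, [])
      | some j =>
        if pvCIdx arr (if (i-1) % 2 = 1 then i else i+1) j
        then (true, res ++ pvEIdx arr (if (i-1) % 2 = 1 then i+1 else i) j)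
        else (false, []) := by
  intro n
  induction n with
  | zero =>
    intro i depth res hn hi
    rw [pvScanB, pvFindCloseA]
    simp [show ¬ i < arr.length by omega]
  | succ n ih =>
    intro i depth res hn hi
    by_cases h : i < arr.length
    · by_cases hcl : arr.getD i "" = ")" ∧ depth = 1
      · -- the matching close paren: success with the accumulated result
        rw [pvScanB]
        simp only [dif_pos h]
        rw [if_pos hcl, pvFindCloseA]
        simp only [dif_pos h]
        rw [if_neg (by rw [hcl.1]; decide), if_pos hcl.1,
            if_pos (show depth - 1 = 0 by have := hcl.2; omega)]
        rw [show (match some i with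
              | none => ((false : Bool), ([] : List String))
              | some j =>
                if pvCIdx arr (if (i-1) % 2 = 1 then i else i+1) j
                then (true, res ++ pvEIdx arr (if (i-1) % 2 = 1 then i+1 else i) j)
                else (false, [])) =
            if pvCIdx arr (if (i-1) % 2 = 1 then i else i+1) i
            then (true, res ++ pvEIdx arr (if (i-1) % 2 = 1 then i+1 else i) i)
            else (false, []) from rfl]
        rw [pvCIdx_stop _ _ _ (by split <;> omega), pvEIdx_stop _ _ _ (by split <;> omega)]
        simp
      · -- findClose at i steps to i+1 with the updated depth, for any token
        have hstep : pvFindCloseA arr i depth =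
            pvFindCloseA arr (i+1)
              (if arr.getD i "" = "(" then depth + 1
               else if arr.getD i "" = ")" then depth - 1 else depth) := by
          rw [pvFindCloseA]
          simp only [dif_pos h]
          by_cases h1 : arr.getD i "" = "("
          · rw [if_pos h1, if_pos h1]
          · rw [if_neg h1, if_neg h1]
            by_cases h2 : arr.getD i "" = ")"
            · have hd : depth ≠ 1 := fun hd => hcl ⟨h2, hd⟩
              rw [if_pos h2, if_pos h2, if_neg (show ¬ depth - 1 = 0 by omega)]
            · rw [if_neg h2, if_neg h2]
        rw [pvScanB]
        simp only [dif_pos h]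
        rw [if_neg hcl]
        by_cases hodd : (i - 1) % 2 = 1
        · by_cases hc : arr.getD i "" = ","
          · -- odd offset, a comma: continue with the same depth and accumulator
            have hdep' : (if arr.getD i "" = "(" then depth + 1
                else if arr.getD i "" = ")" then depth - 1 else depth) = depth := by
              rw [hc]; simp
            rw [if_neg (fun hx => hx.2 hc), if_pos hodd, hdep']
            rw [ih (i+1) depth res (by omega) (by omega)]
            rw [hstep, hdep']
            cases hf : pvFindCloseA arr (i+1) depth with
            | none => rfl
            | some j =>
              have hij := (pvFindCloseA_some arr n (i+1) depth j (by omega) hf).1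
              have hnm : ¬ (i + 1 - 1) % 2 = 1 := by omega
              simp only [if_neg hnm, if_pos hodd]
              rw [pvCIdx_comma arr i j hc]
          · -- odd offset, not a comma: both pipelines yield (false, [])
            rw [if_pos ⟨hodd, hc⟩, hstep]
            cases hf : pvFindCloseA arr (i+1)
                (if arr.getD i "" = "(" then depth + 1
                 else if arr.getD i "" = ")" then depth - 1 else depth) with
            | none => rfl
            | some j =>
              have hij := (pvFindCloseA_some arr n (i+1) _ j (by omega) hf).1
              rw [if_pos hodd]
              have hb : (arr.getD i "" == ",") = false := beq_eq_false_iff_ne.mpr hc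
              have hfalse : pvCIdx arr i j = false := by
                rw [pvCIdx, if_pos (show i < j by omega), hb]
                simp
              simp [hfalse]
        · -- even offset: collect the token, update the depth
          rw [if_neg (fun hx => hodd hx.1), if_neg hodd]
          rw [ih (i+1) _ (res ++ [arr.getD i ""]) (by omega) (by omega)]
          rw [hstep]
          cases hf : pvFindCloseA arr (i+1)
              (if arr.getD i "" = "(" then depth + 1
               else if arr.getD i "" = ")" then depth - 1 else depth) with
          | none => rfl
          | some j =>
            have hij := (pvFindCloseA_some arr n (i+1) _ j (by omega) hf).1
            have hm : (i + 1 - 1) % 2 = 1 := by omega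
            simp only [if_pos hm, if_neg hodd]
            rw [show pvEIdx arr i j = arr.getD i "" :: pvEIdx arr (i+2) j by
              rw [pvEIdx, if_pos (show i < j by omega)]]
            by_cases hq : pvCIdx arr (i+1) j = true
            · rw [if_pos hq, if_pos hq]
              simp
            · rw [if_neg hq, if_neg hq]
    · rw [pvScanB, pvFindCloseA]
      simp [show ¬ i < arr.length by omega]

-- element bridge: contenido = arr[1:idx] read at offset p is arr at index p+1
lemma pvContent_getD (arr : List String) (idx p : Nat) (hp : p + 1 < idx) :
    ((arr.drop 1).take (idx - 1)).getD p "" = arr.getD (p+1) "" := by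
  rw [List.getD_eq_getElem?_getD, List.getD_eq_getElem?_getD,
      List.getElem?_take_of_lt (by omega), List.getElem?_drop, Nat.add_comm]

lemma pvContent_length (arr : List String) (idx : Nat) (h1 : 1 ≤ idx) (hidx : idx ≤ arr.length) :
    ((arr.drop 1).take (idx - 1)).length = idx - 1 := by
  rw [List.length_take, List.length_drop]
  omega

-- Bridges from A's passes over contenido = arr[1:idx] to the index-based views.
lemma pvCommaOkA_bridge (arr : List String) (idx : Nat) (h1 : 1 ≤ idx) (h2 : idx ≤ arr.length) :
    ∀ (n p : Nat), idx ≤ p + 1 + n →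
    pvCommaOkA ((arr.drop 1).take (idx - 1)) p = pvCIdx arr (p+1) idx := by
  intro n
  induction n with
  | zero =>
    intro p hn
    rw [pvCommaOkA, pvCIdx, pvContent_length arr idx h1 h2]
    rw [if_neg (show ¬ p < idx - 1 by omega), if_neg (show ¬ p + 1 < idx by omega)]
  | succ n ih =>
    intro p hn
    rw [pvCommaOkA, pvCIdx, pvContent_length arr idx h1 h2]
    by_cases hp : p + 1 < idx
    · rw [if_pos (show p < idx - 1 by omega), if_pos hp,
          pvContent_getD arr idx p hp, ih (p+2) (by omega)]
    · rw [if_neg (show ¬ p < idx - 1 by omega), if_neg hp]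

lemma pvEvensA_bridge (arr : List String) (idx : Nat) (h1 : 1 ≤ idx) (h2 : idx ≤ arr.length) :
    ∀ (n p : Nat), idx ≤ p + 1 + n →
    pvEvensA ((arr.drop 1).take (idx - 1)) p = pvEIdx arr (p+1) idx := by
  intro n
  induction n with
  | zero =>
    intro p hn
    rw [pvEvensA, pvEIdx, pvContent_length arr idx h1 h2]
    rw [if_neg (show ¬ p < idx - 1 by omega), if_neg (show ¬ p + 1 < idx by omega)]
  | succ n ih =>
    intro p hn
    rw [pvEvensA, pvEIdx, pvContent_length arr idx h1 h2]
    by_cases hp : p + 1 < idx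
    · rw [if_pos (show p < idx - 1 by omega), if_pos hp,
          pvContent_getD arr idx p hp, ih (p+2) (by omega)]
    · rw [if_neg (show ¬ p < idx - 1 by omega), if_neg hp]

-- ===== VERDICT (by name: the statement is the Claim_ definition above) =====
theorem validar_y_extraer_parametros_spec : Claim_equal_validar_y_extraer_parametros := by
  intro arr hdom hpre
  unfold Spec_validar_y_extraer_parametros
  cases arr with
  | nil => exact absurd rfl hpre
  | cons x xs =>
    have hx0 : PySem.List.pyGet? (x :: xs) 0 = some x := by simp [pysem]
    simp only [validar_y_extraer_parametros, validar_y_extraer_parametros_alt, hx0]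
    by_cases hx : x ≠ "("
    · rw [if_pos hx, if_pos hx]
    · rw [if_neg hx, if_neg hx]
      rw [pvScanB_eq (x :: xs) (x :: xs).length 1 1 [] (by omega) le_rfl]
      cases hf : pvFindCloseA (x :: xs) 1 1 with
      | none => rfl
      | some idx =>
        have hs := pvFindCloseA_some (x :: xs) (x :: xs).length 1 1 idx (by omega) hf
        have h1 : 1 ≤ idx := hs.1
        have h2 : idx ≤ (x :: xs).length := le_of_lt hs.2.1
        have hsl : PySem.List.slice (x :: xs) (some 1) (some (idx : Int)) =
            ((x :: xs).drop 1).take (idx - 1) := by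
          rw [PySem.List.slice_toNat (x :: xs) (by omega) (by omega)]
          simp
        simp only [hsl]
        rw [pvCommaOkA_bridge (x :: xs) idx h1 h2 (x :: xs).length 1 (by omega),
            pvEvensA_bridge (x :: xs) idx h1 h2 (x :: xs).length 0 (by omega)]
        simp
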